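-- pv_equiv track=rewrite | github.com/rajulubheem/thrivix | backend/app/services/news_aggregator.py | _group_articles
-- ===== SOURCE A (Python) =====
-- from typing import List, Dict, Any, Optional
--
-- def _group_articles(articles: List[Dict]) -> Dict[str, List[Dict]]:
--     """Group articles by category and source"""
--     grouped = {
--         "by_category": {},
--         "by_source": {},
--         "by_date": {}
--     }
--
--     for article in articles:
--         # By category
--         category = article.get("category", "general")
--         if category not in grouped["by_category"]:
--             grouped["by_category"][category] = []
--         grouped["by_category"][category].append(article)
--
--         # By source
--         source = article.get("source", "unknown")
--         if source not in grouped["by_source"]: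
--             grouped["by_source"][source] = []
--         grouped["by_source"][source].append(article)
--
--         # By date
--         pub_date = article.get("published_at", "")
--         if pub_date:
--             date_key = pub_date[:10]  # YYYY-MM-DD
--             if date_key not in grouped["by_date"]:
--                 grouped["by_date"][date_key] = []
--             grouped["by_date"][date_key].append(article)
--
--     return grouped
-- ===== SOURCE B (Python) =====
-- from typing import List, Dict, Any, Optional
--
--
-- def _group_by(articles, keyfunc):
--     groups = {}
--     for article in articles:
--         key = keyfunc(article)
--         if key is None:
--             continue
--         groups.setdefault(key, []).append(article)
--     return groups
--
--
-- def _group_articles(articles: List[Dict]) -> Dict[str, List[Dict]]: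
--     """Group articles by category and source"""
--     return {
--         "by_category": _group_by(articles, lambda a: a.get("category", "general")),
--         "by_source": _group_by(articles, lambda a: a.get("source", "unknown")),
--         "by_date": _group_by(
--             articles,
--             lambda a: a.get("published_at", "")[:10] if a.get("published_at", "") else None,
--         ),
--     }
-- ===== Notes on version B (the rewrite author's own statement) =====
-- stated objective: simpler
-- what changed: Replaced the single combined loop that interleaves three groupings with a shared group_by helper (one dict via setdefault, skipping None keys) applied in three independent passes, one per grouping key.
import Mathlib
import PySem

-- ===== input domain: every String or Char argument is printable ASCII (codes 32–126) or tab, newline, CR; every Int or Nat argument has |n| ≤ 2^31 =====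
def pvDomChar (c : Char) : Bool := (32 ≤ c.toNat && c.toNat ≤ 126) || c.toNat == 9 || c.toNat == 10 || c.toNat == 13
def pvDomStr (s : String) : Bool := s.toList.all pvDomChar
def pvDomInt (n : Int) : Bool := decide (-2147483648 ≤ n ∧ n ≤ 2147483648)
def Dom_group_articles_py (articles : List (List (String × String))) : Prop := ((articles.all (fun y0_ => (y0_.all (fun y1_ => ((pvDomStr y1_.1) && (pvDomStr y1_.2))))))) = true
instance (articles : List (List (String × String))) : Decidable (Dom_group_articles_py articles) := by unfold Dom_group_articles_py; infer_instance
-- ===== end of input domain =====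

-- B replaces A's single combined loop by a shared group_by helper applied in three
-- independent passes (simpler decomposition; same cost, no speed claim).

-- shared helper: article.get(key, dflt) on the association-list article (first match)
def pvGet (article : List (String × String)) (key dflt : String) : String :=
  (PySem.Dict.mk article).getD key dflt

-- ===== PORT A =====
def group_articles_py (articles : List (List (String × String))) : List (String × List (String × List (List (String × String)))) :=
  let g := articles.foldl
    (fun g article =>
      -- By category
      let category := pvGet article "category" "general"
      let byCat := if g.1.contains category then g.1 else g.1.insert category []
      let byCat := byCat.modify category [] (· ++ [article])
      -- By source
      let source := pvGet article "source" "unknown"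
      let bySrc := if g.2.1.contains source then g.2.1 else g.2.1.insert source []
      let bySrc := bySrc.modify source [] (· ++ [article])
      -- By date (skip falsy published_at)
      let pubDate := pvGet article "published_at" ""
      let byDate :=
        if pubDate == "" then g.2.2
        else
          let dateKey := PySem.Str.slice pubDate none (some 10)
          let d := if g.2.2.contains dateKey then g.2.2 else g.2.2.insert dateKey []
          d.modify dateKey [] (· ++ [article])
      (byCat, bySrc, byDate))
    ((PySem.Dict.empty : PySem.Dict String (List (List (String × String)))),
     (PySem.Dict.empty : PySem.Dict String (List (List (String × String)))),
     (PySem.Dict.empty : PySem.Dict String (List (List (String × String)))))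
  [("by_category", g.1.items), ("by_source", g.2.1.items), ("by_date", g.2.2.items)]

-- ===== PORT B =====
def pvGroupBy (articles : List (List (String × String)))
    (keyfunc : List (String × String) → Option String) :
    PySem.Dict String (List (List (String × String))) :=
  articles.foldl
    (fun groups article =>
      match keyfunc article with
      | none => groups
      | some key => (groups.setdefault key []).modify key [] (· ++ [article]))
    PySem.Dict.empty

def group_articles_py_alt (articles : List (List (String × String))) : List (String × List (String × List (List (String × String)))) :=
  [("by_category", (pvGroupBy articles (fun a => some (pvGet a "category" "general"))).items),
   ("by_source", (pvGroupBy articles (fun a => some (pvGet a "source" "unknown"))).items),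
   ("by_date", (pvGroupBy articles (fun a =>
      let p := pvGet a "published_at" ""
      if p == "" then none else some (PySem.Str.slice p none (some 10)))).items)]

-- ===== PRECONDITION & SPEC =====
-- instance synthesis times out on this deeply nested type; build DecidableEq explicitly
def pvDecEq3 : DecidableEq (String × List (List (String × String))) := fun _ _ => inferInstance
def pvDecEq4 : DecidableEq (List (String × List (List (String × String)))) := @instDecidableEqList _ pvDecEq3
def pvDecEq5 : DecidableEq (String × List (String × List (List (String × String)))) := @instDecidableEqProd _ _ _ pvDecEq4
def pvDecEq6 : DecidableEq (List (String × List (String × List (List (String × String))))) := @instDecidableEqList _ pvDecEq5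

def Spec_group_articles_py (articles : List (List (String × String))) (out : List (String × List (String × List (List (String × String))))) : Prop := out = group_articles_py_alt articles
instance (articles : List (List (String × String))) (out : List (String × List (String × List (List (String × String))))) : Decidable (Spec_group_articles_py articles out) := by unfold Spec_group_articles_py; exact pvDecEq6 out (group_articles_py_alt articles)

-- ===== CLAIM (what is proved, stated in full; the proofs are below) =====
def Claim_equal_group_articles_py : Prop := ∀ (articles : List (List (String × String))), Dom_group_articles_py articles → Spec_group_articles_py articles (group_articles_py articles)

-- ===== LEMMAS AND PROOFS =====

-- B's setdefault-then-append step equals A's membership-test-then-append step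
lemma pv_step_eq (g : PySem.Dict String (List (List (String × String)))) (k : String)
    (a : List (String × String)) :
    (g.setdefault k []).modify k [] (· ++ [a]) =
      (if g.contains k then g else g.insert k []).modify k [] (· ++ [a]) := by
  by_cases h : g.contains k = true
  · rw [PySem.Dict.setdefault_of_contains _ _ h, if_pos h]
  · rw [PySem.Dict.setdefault_of_not_contains _ _ (by simpa using h), if_neg (by simpa using h)]

-- A's interleaved fold over the triple of dicts is the triple of B's three folds
lemma pv_fold_split (articles : List (List (String × String)))
    (c s d : PySem.Dict String (List (List (String × String)))) :
    articles.foldl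
      (fun g article =>
        let category := pvGet article "category" "general"
        let byCat := if g.1.contains category then g.1 else g.1.insert category []
        let byCat := byCat.modify category [] (· ++ [article])
        let source := pvGet article "source" "unknown"
        let bySrc := if g.2.1.contains source then g.2.1 else g.2.1.insert source []
        let bySrc := bySrc.modify source [] (· ++ [article])
        let pubDate := pvGet article "published_at" ""
        let byDate :=
          if pubDate == "" then g.2.2
          else
            let dateKey := PySem.Str.slice pubDate none (some 10)
            let d := if g.2.2.contains dateKey then g.2.2 else g.2.2.insert dateKey []
            d.modify dateKey [] (· ++ [article])
        (byCat, bySrc, byDate)) (c, s, d) =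
    (articles.foldl
      (fun groups article =>
        match some (pvGet article "category" "general") with
        | none => groups
        | some key => (groups.setdefault key []).modify key [] (· ++ [article])) c,
     articles.foldl
      (fun groups article =>
        match some (pvGet article "source" "unknown") with
        | none => groups
        | some key => (groups.setdefault key []).modify key [] (· ++ [article])) s,
     articles.foldl
      (fun groups article =>
        match (let p := pvGet article "published_at" ""
               if p == "" then none else some (PySem.Str.slice p none (some 10))) with
        | none => groups
        | some key => (groups.setdefault key []).modify key [] (· ++ [article])) d) := by
  induction articles generalizing c s d with
  | nil => rfl
  | cons a t ih =>
    simp only [List.foldl_cons]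
    rw [ih]
    by_cases h : (pvGet a "published_at" "" == "") = true
    · simp [h, pv_step_eq]
    · simp [h, pv_step_eq]

-- ===== VERDICT (by name: the statement is the Claim_ definition above) =====
theorem group_articles_py_spec : Claim_equal_group_articles_py := by
  intro articles _
  unfold Spec_group_articles_py group_articles_py group_articles_py_alt pvGroupBy
  simp only
  rw [pv_fold_split]
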